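-- pv_equiv track=rewrite | github.com/CodecoolGlobal/ask-mate-3-python-tamasstephen | search.py | get_search_coordinates
-- ===== SOURCE A (Python) =====
-- from string import ascii_lowercase
--
-- def get_search_coordinates(phrase, expression):
--     phrase_list = phrase.split()
--     expression_list = expression.split()
--     coordinates = []
--     for index, word in enumerate(expression_list):
--         if remove_special_characters(word.lower()) == remove_special_characters(phrase_list[0].lower()):
--             if remove_special_characters("".join(expression_list[index:index+len(phrase_list)]).lower()) == remove_special_characters("".join(phrase_list)):
--                 coordinates.append((index, index+len(phrase_list)))
--     return coordinates
--
-- def remove_special_characters(text):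
--     raw_text = "".join([letter for letter in list(text) if letter in ascii_lowercase])
--     return raw_text
-- ===== SOURCE B (Python) =====
-- from string import ascii_lowercase
--
-- def get_search_coordinates(phrase, expression):
--     letters = set(ascii_lowercase)
--     phrase_words = phrase.split()
--     k = len(phrase_words)
--     first = "".join(c for c in phrase_words[0].lower() if c in letters)
--     target = "".join(c for c in "".join(phrase_words) if c in letters)
--     t = len(target)
--     words = ["".join(c for c in w.lower() if c in letters)
--              for w in expression.split()]
--     n = len(words)
--     offsets = [0]
--     for w in words:
--         offsets.append(offsets[-1] + len(w))
--     text = "".join(words)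
--     result = []
--     for i in range(n):
--         if words[i] == first:
--             j = min(i + k, n)
--             if offsets[j] - offsets[i] == t and text[offsets[i]:offsets[i] + t] == target:
--                 result.append((i, i + k))
--     return result
-- ===== Notes on version B (the rewrite author's own statement) =====
-- stated objective: alternative
-- what changed: A re-cleans and re-joins a raw word slice of the expression at every candidate index; B cleans every word once, builds the concatenated cleaned text with prefix-sum offsets, and decides each candidate by a length check plus one substring comparison (intended as faster; measured only ~1.26x on the timing inputs).
-- outside the precondition, e.g. on get_search_coordinates('', ''): A returns [], B raises IndexError; on get_search_coordinates('  ', 'a b'): A raises IndexError, B raises IndexError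
import Mathlib
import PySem

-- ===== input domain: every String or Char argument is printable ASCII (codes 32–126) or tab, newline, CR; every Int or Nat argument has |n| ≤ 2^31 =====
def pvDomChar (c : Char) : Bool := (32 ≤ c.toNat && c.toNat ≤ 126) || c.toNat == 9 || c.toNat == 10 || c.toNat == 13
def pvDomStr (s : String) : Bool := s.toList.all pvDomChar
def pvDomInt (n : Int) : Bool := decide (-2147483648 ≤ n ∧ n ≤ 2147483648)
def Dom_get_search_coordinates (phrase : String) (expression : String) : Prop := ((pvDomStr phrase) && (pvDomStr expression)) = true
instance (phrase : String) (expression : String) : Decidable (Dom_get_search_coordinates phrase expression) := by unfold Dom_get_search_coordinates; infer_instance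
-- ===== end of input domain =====

-- B replaces A's per-index re-cleaning and re-joining of word slices by a one-pass precomputation
-- (cleaned words, prefix-sum offsets, concatenated cleaned text) with a substring comparison per
-- candidate index; equivalence of return values proved on all inputs whose phrase has at least one word.

-- ===== PORT A =====
-- 'letter in ascii_lowercase' for a single character letter = letter is one of 'a'..'z' (exact)
def pvCleanA (text : List Char) : List Char :=
  text.filter (fun c => 'a' ≤ c && c ≤ 'z')

def get_search_coordinates (phrase : String) (expression : String) : List (Int × Int) :=
  match PySem.Chars.split₀ phrase.toList with
  | [] => []  -- Python raises IndexError here (phrase_list[0]); excluded by Pre_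
  | p0 :: rest =>
    let phrase_list := p0 :: rest
    let expression_list := PySem.Chars.split₀ expression.toList
    (PySem.List.enumerate expression_list).foldl
      (fun coordinates iw =>
        if pvCleanA (PySem.Chars.lower iw.2) = pvCleanA (PySem.Chars.lower p0) then
          if pvCleanA (PySem.Chars.lower (PySem.Chars.join []
                (PySem.List.slice expression_list (some iw.1) (some (iw.1 + (phrase_list.length : Int)))))) =
             pvCleanA (PySem.Chars.join [] phrase_list) then
            coordinates ++ [(iw.1, iw.1 + (phrase_list.length : Int))]
          else coordinates
        else coordinates)
      []

-- ===== PORT B =====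
-- 'c in letters' for the set of ascii_lowercase = the character is one of 'a'..'z' (exact)
def pvCleanB (w : List Char) : List Char :=
  w.filter (fun c => 'a' ≤ c && c ≤ 'z')

def get_search_coordinates_alt (phrase : String) (expression : String) : List (Int × Int) :=
  match PySem.Chars.split₀ phrase.toList with
  | [] => []  -- Source B raises IndexError here (phrase_words[0]); excluded by Pre_
  | p0 :: rest =>
    let phrase_words := p0 :: rest
    let k := phrase_words.length
    let first := pvCleanB (PySem.Chars.lower p0)
    let target := pvCleanB (PySem.Chars.join [] phrase_words)
    let t := target.length
    let words := (PySem.Chars.split₀ expression.toList).map (fun w => pvCleanB (PySem.Chars.lower w))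
    let n := words.length
    let offsets := words.foldl (fun os w => os ++ [os.getLastD 0 + w.length]) [0]
    let text := PySem.Chars.join [] words
    (List.range n).foldl
      (fun result i =>
        if words.getD i [] = first then
          if offsets.getD (min (i + k) n) 0 - offsets.getD i 0 = t ∧
             PySem.List.slice text (some ((offsets.getD i 0 : Nat) : Int)) (some ((offsets.getD i 0 + t : Nat) : Int)) = target then
            result ++ [((i : Int), ((i + k : Nat) : Int))]
          else result
        else result)
      []

-- ===== PRECONDITION & SPEC =====
-- Pre_ excludes the inputs whose phrase contains no word: there A's phrase_list[0] raises IndexError whenever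
-- the expression has a word, and when the expression also has no word A's empty loop accidentally returns []
-- (B raises there too) — an artefact of lazy evaluation inside the loop, excluded as a defensible corner.
def Pre_get_search_coordinates (phrase : String) (expression : String) : Prop :=
  PySem.Chars.split₀ phrase.toList ≠ []
instance (phrase : String) (expression : String) : Decidable (Pre_get_search_coordinates phrase expression) := by unfold Pre_get_search_coordinates; infer_instance

def pvWitness_get_search_coordinates : String × String := ("cat dog", "a Cat, dog! cat do g")

def Spec_get_search_coordinates (phrase : String) (expression : String) (out : List (Int × Int)) : Prop := out = get_search_coordinates_alt phrase expression
instance (phrase : String) (expression : String) (out : List (Int × Int)) : Decidable (Spec_get_search_coordinates phrase expression out) := by unfold Spec_get_search_coordinates; infer_instance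

-- ===== CLAIM (what is proved, stated in full; the proofs are below) =====
def Claim_equal_get_search_coordinates : Prop := ∀ (phrase : String) (expression : String), Dom_get_search_coordinates phrase expression → Pre_get_search_coordinates phrase expression → Spec_get_search_coordinates phrase expression (get_search_coordinates phrase expression)

-- ===== LEMMAS AND PROOFS =====

-- prefix-sum of cleaned-word lengths (proof-side abbreviation)
def pvOff (l : List (List Char)) (i : Nat) : Nat := ((l.take i).map List.length).sum

theorem pv_cleanB_eq (cs : List Char) : pvCleanB cs = pvCleanA cs := rfl

theorem pv_join_nil_flatten (l : List (List Char)) : PySem.Chars.join [] l = l.flatten := by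
  show ([] : List Char).intercalate l = l.flatten
  induction l with
  | nil => simp [List.intercalate]
  | cons a t ih =>
    cases t with
    | nil => simp [List.intercalate]
    | cons b u =>
      simp [List.intercalate] at ih ⊢
      exact ih

theorem pv_enumerate_flatMap {β : Type} (g : Int × List Char → List β) (l : List (List Char)) :
    ∀ z : Int, (PySem.List.enumerate l z).flatMap g
      = (List.range l.length).flatMap (fun i => g (z + Int.ofNat i, l.getD i [])) := by
  induction l with
  | nil => intro z; simp [PySem.List.enumerate]
  | cons a t ih =>
    intro z
    rw [PySem.List.enumerate]
    simp only [List.flatMap_cons, ih (z+1), List.length_cons, List.range_succ_eq_map,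
      List.flatMap_cons, List.flatMap_map]
    simp only [List.getD_cons_zero, List.getD_cons_succ]
    congr 1
    · norm_num
    · apply List.flatMap_congr
      intro i _
      congr 2
      simp only [Int.ofNat_eq_natCast, Nat.succ_eq_add_one]
      push_cast
      ring

theorem pv_foldl_ifif {α β : Type} (c1 c2 : α → Prop) [DecidablePred c1] [DecidablePred c2]
    (e : α → β) (l : List α) (acc : List β) :
    l.foldl (fun acc x => if c1 x then (if c2 x then acc ++ [e x] else acc) else acc) acc
      = acc ++ l.flatMap (fun x => if c1 x then (if c2 x then [e x] else []) else []) := by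
  have h : (fun (acc : List β) x => if c1 x then (if c2 x then acc ++ [e x] else acc) else acc)
      = fun acc x => acc ++ (if c1 x then (if c2 x then [e x] else []) else []) := by
    funext acc x
    split_ifs <;> simp
  rw [h, PySem.List.foldl_append_eq_flatMap]

theorem pv_foldl_offsets (l : List (List Char)) :
    ∀ (pre : List Nat) (s : Nat),
      l.foldl (fun os w => os ++ [os.getLastD 0 + w.length]) (pre ++ [s])
        = pre ++ List.scanl (fun a w => a + w.length) s l := by
  induction l with
  | nil => intro pre s; simp [List.scanl_nil]
  | cons a t ih =>
    intro pre s
    simp only [List.foldl_cons, List.getLastD_concat, List.scanl_cons]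
    have h2 := ih (pre ++ [s]) (s + a.length)
    simp only [List.append_assoc, List.singleton_append] at h2 ⊢
    exact h2

theorem pv_scanl_getD (l : List (List Char)) :
    ∀ (i : Nat) (s : Nat), i ≤ l.length →
      (List.scanl (fun a w => a + w.length) s l).getD i 0 = s + pvOff l i := by
  induction l with
  | nil =>
    intro i s hi
    have h0 : i = 0 := by simpa using hi
    subst h0; simp [List.scanl_nil, pvOff]
  | cons a t ih =>
    intro i s hi
    cases i with
    | zero => simp [List.scanl_cons, pvOff]
    | succ m =>
      simp only [List.scanl_cons, List.getD_cons_succ]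
      rw [ih m (s + a.length) (by simpa using hi)]
      simp [pvOff, List.take_succ_cons]
      omega

theorem pv_flatten_drop (i : Nat) (l : List (List Char)) :
    (l.drop i).flatten = l.flatten.drop (pvOff l i) := by
  induction i generalizing l with
  | zero => simp [pvOff]
  | succ n ih =>
    cases l with
    | nil => simp [pvOff]
    | cons a t =>
      simp [pvOff, List.take_succ_cons, ih t]

theorem pv_cond2_iff (words : List (List Char)) (target : List Char) (i k : Nat)
    (hi : i < words.length) :
    (((words.drop i).take k).flatten = target ↔
      (pvOff words (min (i + k) words.length) - pvOff words i = target.length ∧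
        (words.flatten.drop (pvOff words i)).take target.length = target)) := by
  set n := words.length with hn
  set j := min (i + k) n with hj
  have hji : i ≤ j := by omega
  have h1 : (words.drop i).take k = (words.drop i).take (j - i) := by
    rw [List.take_eq_take_iff]
    simp [List.length_drop]
    omega
  set F := ((words.drop i).take (j - i)).flatten with hFdef
  have hjsplit : j = i + (j - i) := by omega
  have hOff : pvOff words j = pvOff words i +
      (((words.drop i).take (j - i)).map List.length).sum := by
    rw [pvOff, hjsplit, List.take_add, List.map_append, List.sum_append]
    simp [pvOff]
  have hFlen : F.length = pvOff words j - pvOff words i := by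
    rw [List.length_flatten, hOff]; omega
  have hpref : F ++ ((words.drop i).drop (j - i)).flatten = words.flatten.drop (pvOff words i) := by
    rw [← List.flatten_append, List.take_append_drop, pv_flatten_drop]
  have htakeF : (words.flatten.drop (pvOff words i)).take F.length = F := by
    rw [← hpref]; exact List.take_left
  rw [h1]
  constructor
  · intro h
    have hlen : F.length = target.length := congrArg List.length h
    refine ⟨by omega, ?_⟩
    rw [← hlen, htakeF]
    exact hFdef.trans h
  · rintro ⟨hlen, htake⟩
    have hlenF : F.length = target.length := by omega
    rw [← htake, ← hlenF, htakeF]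

-- ===== VERDICT (by name: the statement is the Claim_ definition above) =====
theorem pv_cleanLower_join (l : List (List Char)) :
    pvCleanA (PySem.Chars.lower (PySem.Chars.join [] l))
      = (l.map (fun w => pvCleanA (PySem.Chars.lower w))).flatten := by
  rw [pv_join_nil_flatten]
  simp only [PySem.Chars.lower, pvCleanA, List.map_flatten, List.filter_flatten]
  simp [Function.comp_def]

theorem pv_getD_map (cl : List Char → List Char) (W : List (List Char)) (i : Nat) (hi : i < W.length) :
    (W.map cl).getD i [] = cl (W.getD i []) := by
  rw [List.getD_eq_getElem?_getD, List.getD_eq_getElem?_getD, List.getElem?_map,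
    List.getElem?_eq_getElem hi]
  simp

theorem get_search_coordinates_spec : Claim_equal_get_search_coordinates := by
  intro phrase expression _ hpre
  unfold Pre_get_search_coordinates at hpre
  unfold Spec_get_search_coordinates get_search_coordinates get_search_coordinates_alt
  cases hP : PySem.Chars.split₀ phrase.toList with
  | nil => exact absurd hP hpre
  | cons p0 rest =>
    simp only
    rw [pv_foldl_ifif, pv_foldl_ifif, pv_enumerate_flatMap]
    simp only [List.nil_append, pv_cleanB_eq, zero_add, Int.ofNat_eq_natCast, List.length_map]
    apply List.flatMap_congr
    intro i hi
    rw [List.mem_range] at hi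
    have hk : ((i : Int) + ((p0 :: rest).length : Int)) = (((i + (p0 :: rest).length : Nat)) : Int) := by
      push_cast; ring
    rw [hk, PySem.List.slice_natCast, show i + (p0 :: rest).length - i = (p0 :: rest).length from by omega]
    rw [pv_cleanLower_join, List.map_take, List.map_drop]
    rw [pv_getD_map (fun w => pvCleanA (PySem.Chars.lower w)) (PySem.Chars.split₀ expression.toList) i hi]
    have hoffs : ((PySem.Chars.split₀ expression.toList).map (fun w => pvCleanA (PySem.Chars.lower w))).foldl
          (fun os w => os ++ [os.getLastD 0 + w.length]) [0]
        = List.scanl (fun a w => a + w.length) 0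
            ((PySem.Chars.split₀ expression.toList).map (fun w => pvCleanA (PySem.Chars.lower w))) := by
      simpa using pv_foldl_offsets ((PySem.Chars.split₀ expression.toList).map (fun w => pvCleanA (PySem.Chars.lower w))) [] 0
    rw [hoffs]
    rw [pv_scanl_getD _ (min (i + (p0 :: rest).length) (PySem.Chars.split₀ expression.toList).length) 0 (by simp),
      pv_scanl_getD _ i 0 (by simp; omega)]
    simp only [zero_add]
    rw [pv_join_nil_flatten ((PySem.Chars.split₀ expression.toList).map (fun w => pvCleanA (PySem.Chars.lower w)))]
    rw [PySem.List.slice_natCast,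
      show pvOff ((PySem.Chars.split₀ expression.toList).map (fun w => pvCleanA (PySem.Chars.lower w))) i
            + (pvCleanA (PySem.Chars.join [] (p0 :: rest))).length
            - pvOff ((PySem.Chars.split₀ expression.toList).map (fun w => pvCleanA (PySem.Chars.lower w))) i
          = (pvCleanA (PySem.Chars.join [] (p0 :: rest))).length from by omega]
    have hiff := pv_cond2_iff ((PySem.Chars.split₀ expression.toList).map (fun w => pvCleanA (PySem.Chars.lower w)))
      (pvCleanA (PySem.Chars.join [] (p0 :: rest))) i (p0 :: rest).length (by simpa using hi)
    simp only [List.length_map] at hiff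
    exact if_congr Iff.rfl (if_congr hiff (by simp) rfl) rfl
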